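-- pv_equiv track=rewrite | github.com/CiscoSecurity/fp-05-firepower-cef-connector-arcsight | estreamer/adapters/binstr.py | _chart
-- ===== SOURCE A (Python) =====
-- def _chart( byteArray ):
--     separator = '{: >5}{:-<63}{:<1}'.format('|', '', '|')
--
--     output = [
--         '{:<4}{:<8}{:<6}{:>3}{: >8}{:>8}{:>8}{:>8}{:>8}{:>8}'.format(
--             'Byte', '|', '0', '|', '1', '|', '2', '|', '3', '|'),
--         'Bit |0|0|0|0|0|0|0|0|0|0|1|1|1|1|1|1|1|1|1|1|2|2|2|2|2|2|2|2|2|2|3|3|',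
--         '    |0|1|2|3|4|5|6|7|8|9|0|1|2|3|4|5|6|7|8|9|0|1|2|3|4|5|6|7|8|9|0|1|',
--         separator
--     ]
--
--     index = 0
--     for byte in byteArray:
--         if index == 0:
--             line = '    |'
--
--         # Double space byte with pipe after
--         line += ' '.join( '{:0>08b}'.format( byte ) ) + '|'
--         index += 1
--         if index == 4:
--             output.append( line )
--             output.append( separator )
--             index = 0
--
--     if index > 0:
--         output.append( line )
--         output.append( separator )
--
--     output.append('END')
--     output.append('')
--
--     return '\n'.join( output )
-- ===== SOURCE B (Python) =====
-- def _chart(byteArray):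
--     separator = '{: >5}{:-<63}{:<1}'.format('|', '', '|')
--     data = list(byteArray)
--     chunks = []
--     i = 0
--     while i < len(data):
--         chunks.append(data[i:i + 4])
--         i += 4
--     body = []
--     for chunk in chunks:
--         line = '    |' + '|'.join(' '.join('{:0>08b}'.format(b)) for b in chunk) + '|'
--         body.append(line)
--         body.append(separator)
--     output = [
--         '{:<4}{:<8}{:<6}{:>3}{: >8}{:>8}{:>8}{:>8}{:>8}{:>8}'.format(
--             'Byte', '|', '0', '|', '1', '|', '2', '|', '3', '|'),
--         'Bit |0|0|0|0|0|0|0|0|0|0|1|1|1|1|1|1|1|1|1|1|2|2|2|2|2|2|2|2|2|2|3|3|',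
--         '    |0|1|2|3|4|5|6|7|8|9|0|1|2|3|4|5|6|7|8|9|0|1|2|3|4|5|6|7|8|9|0|1|',
--         separator
--     ] + body + ['END', '']
--     return '\n'.join(output)
-- ===== Notes on version B (the rewrite author's own statement) =====
-- stated objective: simpler
-- what changed: B drops A's running line buffer and mod-4 index counter (with its duplicated trailing-group flush) and instead partitions the input into 4-byte chunks, rendering each chunk as one line with a join and appending line+separator uniformly.
import Mathlib
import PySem

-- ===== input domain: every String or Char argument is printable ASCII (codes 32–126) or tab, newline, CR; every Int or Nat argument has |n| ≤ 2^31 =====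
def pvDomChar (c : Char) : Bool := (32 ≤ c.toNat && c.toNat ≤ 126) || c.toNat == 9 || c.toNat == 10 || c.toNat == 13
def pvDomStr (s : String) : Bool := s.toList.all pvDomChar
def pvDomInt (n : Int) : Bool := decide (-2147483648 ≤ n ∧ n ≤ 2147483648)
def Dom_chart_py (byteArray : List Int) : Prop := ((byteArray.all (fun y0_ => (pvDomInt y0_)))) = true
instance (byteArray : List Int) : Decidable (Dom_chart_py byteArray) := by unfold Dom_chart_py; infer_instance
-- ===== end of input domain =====

-- B replaces A's running line/index-counter loop with a uniform partition of the input into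
-- 4-byte chunks, each rendered in one expression (objective: simpler).

-- Shared small helpers (constants and the per-byte cell; both Pythons compute these same values).

-- separator = '{: >5}{:-<63}{:<1}'.format('|','','|') — a format call on constants, transcribed as its value
def chartSep : List Char := "    |---------------------------------------------------------------|".toList
-- the three constant header lines (the first is a format call on constants, transcribed as its value)
def chartHeader : List (List Char) :=
  [ "Byte|       0       |       1       |       2       |       3       |".toList,
    "Bit |0|0|0|0|0|0|0|0|0|0|1|1|1|1|1|1|1|1|1|1|2|2|2|2|2|2|2|2|2|2|3|3|".toList,
    "    |0|1|2|3|4|5|6|7|8|9|0|1|2|3|4|5|6|7|8|9|0|1|2|3|4|5|6|7|8|9|0|1|".toList,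
    chartSep ]

-- '{:0>08b}'.format(byte): binary digits ('-' first for negatives), left-padded with '0' to width 8.
-- Hand-ported padding: '0>' pads BEFORE the sign (unlike zfill); exact for every Int.
def chartFmt8 (b : Int) : List Char :=
  let cs := PySem.Int.toBinChars b
  List.replicate (8 - cs.length) '0' ++ cs

-- ' '.join( '{:0>08b}'.format( byte ) )
def chartSpaced (b : Int) : List Char :=
  PySem.Chars.join [' '] ((chartFmt8 b).map ([·]))

-- ===== PORT A =====
-- the for-loop over byteArray with state (output, line, index), plus the trailing 'if index > 0' flush
def chartLoopA (l : List Int) (output : List (List Char)) (line : List Char) (index : Int) :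
    List (List Char) :=
  match l with
  | [] => if index > 0 then output ++ [line, chartSep] else output
  | b :: rest =>
    let line := if index == 0 then "    |".toList else line
    let line := line ++ chartSpaced b ++ ['|']
    let index := index + 1
    if index == 4 then chartLoopA rest (output ++ [line, chartSep]) line 0
    else chartLoopA rest output line index

def chart_py (byteArray : List Int) : String :=
  String.ofList (PySem.Chars.join ['\n']
    (chartLoopA byteArray chartHeader [] 0 ++ ["END".toList, []]))

-- ===== PORT B =====
-- the while-loop: while i < len(data): chunks.append(data[i:i+4]); i += 4
def chartChunkLoop (data : List Int) (i : Nat) : List (List Int) :=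
  if i < data.length then
    PySem.List.slice data (some (i : Int)) (some ((i : Int) + 4)) :: chartChunkLoop data (i + 4)
  else []
termination_by data.length - i

-- '    |' + '|'.join(' '.join(...) for b in chunk) + '|'
def chartLineB (chunk : List Int) : List Char :=
  "    |".toList ++ PySem.Chars.join ['|'] (chunk.map chartSpaced) ++ ['|']

def chart_py_alt (byteArray : List Int) : String :=
  String.ofList (PySem.Chars.join ['\n']
    (chartHeader ++ (chartChunkLoop byteArray 0).flatMap (fun c => [chartLineB c, chartSep])
      ++ ["END".toList, []]))

-- ===== PRECONDITION & SPEC =====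
def Spec_chart_py (byteArray : List Int) (out : String) : Prop := out = chart_py_alt byteArray
instance (byteArray : List Int) (out : String) : Decidable (Spec_chart_py byteArray out) := by unfold Spec_chart_py; infer_instance

-- ===== CLAIM (what is proved, stated in full; the proofs are below) =====
def Claim_equal_chart_py : Prop := ∀ (byteArray : List Int), Dom_chart_py byteArray → Spec_chart_py byteArray (chart_py byteArray)

-- ===== LEMMAS AND PROOFS =====

-- proof-side view of B's chunking: successive take-4/drop-4 groups
def chartChunks (l : List Int) : List (List Int) :=
  match l with
  | [] => []
  | b :: rest => (b :: rest).take 4 :: chartChunks ((b :: rest).drop 4)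
termination_by l.length
decreasing_by simp [List.length_drop]

@[simp] theorem chartChunks_nil : chartChunks [] = [] := by
  rw [chartChunks.eq_def]

@[simp] theorem chartChunks_cons (b : Int) (rest : List Int) :
    chartChunks (b :: rest) = (b :: rest).take 4 :: chartChunks ((b :: rest).drop 4) := by
  rw [chartChunks.eq_def]

-- Loop invariant: from index 0 (where the line is reset), A's loop emits exactly one
-- line-and-separator pair per 4-byte chunk of the remaining input.
theorem chartLoopA_eq (n : Nat) :
    ∀ (l : List Int), l.length ≤ n → ∀ (acc : List (List Char)) (line : List Char),
      chartLoopA l acc line 0 =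
        acc ++ (chartChunks l).flatMap (fun c => [chartLineB c, chartSep]) := by
  induction n with
  | zero =>
    intro l hl acc line
    have : l = [] := List.eq_nil_of_length_eq_zero (Nat.le_zero.mp hl)
    subst this
    simp [chartLoopA, chartChunks]
  | succ n ih =>
    intro l hl acc line
    match l with
    | [] => simp [chartLoopA, chartChunks]
    | [a] =>
      simp [chartLoopA, chartChunks, chartLineB, PySem.Chars.join, List.intercalate, List.intersperse]
    | [a, b] =>
      simp [chartLoopA, chartChunks, chartLineB, PySem.Chars.join, List.intercalate, List.intersperse]
    | [a, b, c] =>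
      simp [chartLoopA, chartChunks, chartLineB, PySem.Chars.join, List.intercalate, List.intersperse]
    | a :: b :: c :: d :: rest =>
      have hr : rest.length ≤ n := by simp at hl; omega
      simp only [chartLoopA]
      norm_num
      rw [ih rest hr]
      simp [chartChunks, chartLineB, PySem.Chars.join, List.intercalate, List.intersperse]

-- B's index loop computes exactly the take-4/drop-4 chunks of the not-yet-consumed suffix
theorem chartChunkLoop_eq (data : List Int) :
    ∀ (i : Nat), chartChunkLoop data i = chartChunks (data.drop i) := by
  intro i
  induction hn : data.length - i using Nat.strong_induction_on generalizing i with
  | _ n ih =>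
    rw [chartChunkLoop.eq_def]
    split
    · rename_i hlt
      have hslice : PySem.List.slice data (some (i : Int)) (some ((i : Int) + 4)) =
          (data.drop i).take 4 := by
        have := PySem.List.slice_natCast_add (xs := data) (j := i) (n := 4)
        simpa using this
      obtain ⟨d, rest, hd⟩ : ∃ d rest, data.drop i = d :: rest := by
        have : data.drop i ≠ [] := by
          simp [List.drop_eq_nil_iff]; omega
        exact List.exists_cons_of_ne_nil this
      rw [ih (data.length - (i + 4)) (by omega) (i + 4) rfl]
      rw [hd, chartChunks_cons, hslice, hd]
      have : data.drop (i + 4) = (d :: rest).drop 4 := by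
        rw [← hd, List.drop_drop]
      rw [this]
    · rename_i hge
      have : data.drop i = [] := by
        rw [List.drop_eq_nil_iff]; omega
      rw [this, chartChunks_nil]

-- ===== VERDICT (by name: the statement is the Claim_ definition above) =====
theorem chart_py_spec : Claim_equal_chart_py := by
  intro byteArray _
  unfold Spec_chart_py chart_py chart_py_alt
  rw [chartLoopA_eq byteArray.length byteArray le_rfl, chartChunkLoop_eq]
  simp
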